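-- pv_equiv track=rewrite | github.com/xchen034/dyson_sphere_kg | modularity/knowledge_fusion/utils.py | get_rel_dict
-- ===== SOURCE A (Python) =====
-- def get_rel_dict(tuples):
--     rels = {}
--     new_tuples = []
--     for i in range(len(tuples)):
--         rel1, w, rel2 = tuples[i]
--         if rel1 not in rels:
--             rels[rel1] = len(rels)
--         if rel2 not in rels:
--             rels[rel2] = len(rels)
--         rel1idx = rels.get(rel1)
--         rel2idx = rels.get(rel2)
--         new_tuples.append((rel1idx, w, rel2idx))
--     return rels, new_tuples
-- ===== SOURCE B (Python) =====
-- def get_rel_dict(tuples):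
--     names = [x for a, _, b in tuples for x in (a, b)]
--     # reverse overwrite scan: last write wins = first occurrence position
--     first = {}
--     for pos in range(len(names) - 1, -1, -1):
--         first[names[pos]] = pos
--     order = sorted(first, key=first.get)
--     rels = {r: i for i, r in enumerate(order)}
--     new_tuples = [(rels[a], w, rels[b]) for a, w, b in tuples]
--     return rels, new_tuples
-- ===== Notes on version B (the rewrite author's own statement) =====
-- stated objective: alternative
-- what changed: Instead of A's single on-line loop that grows the index dict as it goes, B records each name's first-occurrence position by an overwriting reverse scan, sorts the distinct names by that position to recover the index order, and then remaps the tuples through the finished dict.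
import Mathlib
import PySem

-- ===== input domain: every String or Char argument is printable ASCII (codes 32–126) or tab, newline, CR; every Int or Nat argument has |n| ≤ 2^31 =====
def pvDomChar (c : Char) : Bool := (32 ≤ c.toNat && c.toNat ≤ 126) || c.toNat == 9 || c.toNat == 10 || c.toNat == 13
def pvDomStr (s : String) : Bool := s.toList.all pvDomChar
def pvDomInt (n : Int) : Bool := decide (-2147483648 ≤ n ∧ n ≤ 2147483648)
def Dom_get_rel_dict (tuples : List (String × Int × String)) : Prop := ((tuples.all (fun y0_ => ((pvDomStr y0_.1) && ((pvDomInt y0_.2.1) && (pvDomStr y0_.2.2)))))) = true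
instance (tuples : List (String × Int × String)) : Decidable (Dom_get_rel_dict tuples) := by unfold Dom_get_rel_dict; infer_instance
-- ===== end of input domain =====

-- B replaces A's on-line index assignment by a different algorithm: a reverse overwrite scan records each
-- name's FIRST occurrence position, the distinct names are then SORTED by that position to recover the
-- index order, and the tuples are mapped through the finished dict; alternative decomposition, same result.

-- ===== PORT A =====
-- A's loop body ('if rel1 not in rels: rels[rel1] = len(rels)' twice, then append); 'rels.get' always
-- finds the key (both were just ensured present), ported as getD _ 0.
def pvStepA (st : PySem.Dict String Int × List (Int × Int × Int)) (t : String × Int × String) :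
    PySem.Dict String Int × List (Int × Int × Int) :=
  let rels := st.1
  let rels := if rels.contains t.1 then rels else rels.insert t.1 (rels.size : Int)
  let rels := if rels.contains t.2.2 then rels else rels.insert t.2.2 (rels.size : Int)
  (rels, st.2 ++ [(rels.getD t.1 0, t.2.1, rels.getD t.2.2 0)])

def get_rel_dict (tuples : List (String × Int × String)) : (List (String × Int)) × (List (Int × Int × Int)) :=
  -- for i in range(len(tuples)): rel1, w, rel2 = tuples[i]; … (index always in range, default unused)
  let res := (PySem.List.pyRange 0 (PySem.List.len tuples) 1).foldl
      (fun st i => pvStepA st (PySem.List.pyGetD tuples i ("", 0, ""))) (PySem.Dict.empty, [])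
  (res.1.items, res.2)

-- ===== PORT B =====
def get_rel_dict_alt (tuples : List (String × Int × String)) : (List (String × Int)) × (List (Int × Int × Int)) :=
  let names := tuples.flatMap (fun t => [t.1, t.2.2])
  -- for pos in range(len(names)-1, -1, -1): first[names[pos]] = pos   (index always in range, default unused)
  let first := (PySem.List.pyRange (PySem.List.len names - 1) (-1) (-1)).foldl
      (fun (d : PySem.Dict String Int) pos => d.insert (PySem.List.pyGetD names pos "") pos) PySem.Dict.empty
  -- sorted(first, key=first.get)  (every key is present, so .get is its value; ported as getD _ 0)
  let order := PySem.List.sorted first.keys (fun x => first.getD x 0)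
  -- {r: i for i, r in enumerate(order)}
  let rels := (PySem.List.enumerate order 0).foldl
      (fun (d : PySem.Dict String Int) p => d.insert p.2 p.1) PySem.Dict.empty
  -- [(rels[a], w, rels[b]) for a, w, b in tuples]  (keys always present, ported as getD _ 0)
  (rels.items, tuples.map (fun t => (rels.getD t.1 0, t.2.1, rels.getD t.2.2 0)))

-- ===== PRECONDITION & SPEC =====
def Spec_get_rel_dict (tuples : List (String × Int × String)) (out : (List (String × Int)) × (List (Int × Int × Int))) : Prop := out = get_rel_dict_alt tuples
instance (tuples : List (String × Int × String)) (out : (List (String × Int)) × (List (Int × Int × Int))) : Decidable (Spec_get_rel_dict tuples out) := by unfold Spec_get_rel_dict; infer_instance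

-- ===== CLAIM (what is proved, stated in full; the proofs are below) =====
def Claim_equal_get_rel_dict : Prop := ∀ (tuples : List (String × Int × String)), Dom_get_rel_dict tuples → Spec_get_rel_dict tuples (get_rel_dict tuples)

-- ===== LEMMAS AND PROOFS =====

-- A's per-name step: insert-if-absent with the current size as value
def pvInsN (d : PySem.Dict String Int) (r : String) : PySem.Dict String Int :=
  if d.contains r then d else d.insert r (d.size : Int)

def pvStepD (d : PySem.Dict String Int) (t : String × Int × String) : PySem.Dict String Int :=
  pvInsN (pvInsN d t.1) t.2.2

lemma pvStepA_eq (st : PySem.Dict String Int × List (Int × Int × Int)) (t : String × Int × String) :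
    pvStepA st t = (pvStepD st.1 t,
      st.2 ++ [((pvStepD st.1 t).getD t.1 0, t.2.1, (pvStepD st.1 t).getD t.2.2 0)]) := rfl

lemma pvInsN_contains_self (d : PySem.Dict String Int) (r : String) :
    (pvInsN d r).contains r = true := by
  unfold pvInsN; split_ifs with h
  · exact h
  · exact PySem.Dict.contains_insert_self _ _ _

lemma pvInsN_pres_contains (d : PySem.Dict String Int) (r k : String) (h : d.contains k = true) :
    (pvInsN d r).contains k = true := by
  unfold pvInsN; split_ifs with h'
  · exact h
  · simp [PySem.Dict.contains_insert, h]

lemma pvInsN_pres_getD (d : PySem.Dict String Int) (r k : String) (x : Int)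
    (h : d.contains k = true) : (pvInsN d r).getD k x = d.getD k x := by
  unfold pvInsN; split_ifs with h'
  · rfl
  · have hne : k ≠ r := by rintro rfl; rw [h] at h'; exact h' rfl
    exact PySem.Dict.getD_insert_of_ne _ _ _ hne

lemma pvFold_pres (l : List (String × Int × String)) (d : PySem.Dict String Int) (k : String)
    (x : Int) (h : d.contains k = true) :
    (l.foldl pvStepD d).getD k x = d.getD k x ∧ (l.foldl pvStepD d).contains k = true := by
  induction l generalizing d with
  | nil => exact ⟨rfl, h⟩
  | cons t l ih =>
    have hc : (pvStepD d t).contains k = true :=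
      pvInsN_pres_contains _ _ _ (pvInsN_pres_contains _ _ _ h)
    have hg : (pvStepD d t).getD k x = d.getD k x := by
      unfold pvStepD
      rw [pvInsN_pres_getD _ _ _ _ (pvInsN_pres_contains _ _ _ h), pvInsN_pres_getD _ _ _ _ h]
    obtain ⟨h1, h2⟩ := ih (pvStepD d t) hc
    exact ⟨by simpa [hg] using h1, h2⟩

-- A's loop = dict pass + map through the final dict
lemma pvLoopA (l : List (String × Int × String)) (d : PySem.Dict String Int)
    (acc : List (Int × Int × Int)) :
    l.foldl pvStepA (d, acc) = (l.foldl pvStepD d,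
      acc ++ l.map (fun t => ((l.foldl pvStepD d).getD t.1 0, t.2.1,
                              (l.foldl pvStepD d).getD t.2.2 0))) := by
  induction l generalizing d acc with
  | nil => simp
  | cons t l ih =>
    have h1 : (pvStepD d t).contains t.1 = true :=
      pvInsN_pres_contains _ _ _ (pvInsN_contains_self _ _)
    have h2 : (pvStepD d t).contains t.2.2 = true := pvInsN_contains_self _ _
    simp only [List.foldl_cons, pvStepA_eq, ih, List.map_cons]
    rw [(pvFold_pres l _ t.1 0 h1).1, (pvFold_pres l _ t.2.2 0 h2).1]
    simp

-- the dict pass over tuples is the name pass over the flattened name list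
lemma pvFlat (l : List (String × Int × String)) (d : PySem.Dict String Int) :
    l.foldl pvStepD d = (l.flatMap (fun t => [t.1, t.2.2])).foldl pvInsN d := by
  induction l generalizing d with
  | nil => rfl
  | cons t l ih => simp [pvStepD, ih]

-- enumerate-from-k of the fresh names, as produced by A's insertions
def pvEnum (k : Int) : List String → List (String × Int)
  | [] => []
  | r :: l => (r, k) :: pvEnum (k + 1) l

-- first occurrences of ns not already in seen, in order
def pvNew (seen : List String) : List String → List String
  | [] => []
  | r :: l => if r ∈ seen then pvNew seen l else r :: pvNew (seen ++ [r]) l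

lemma pvItemsA (ns : List String) (d : PySem.Dict String Int) (hnd : d.keys.Nodup) :
    (ns.foldl pvInsN d).items = d.items ++ pvEnum (d.items.length : Int) (pvNew d.keys ns) := by
  induction ns generalizing d with
  | nil => simp [pvNew, pvEnum]
  | cons r l ih =>
    simp only [List.foldl_cons]
    by_cases h : d.contains r = true
    · have hm : r ∈ d.keys := (PySem.Dict.contains_iff_mem_keys _ _).1 h
      rw [show pvInsN d r = d by simp [pvInsN, h]]
      simp [pvNew, hm, ih d hnd]
    · have h' : d.contains r = false := by simpa using h
      have hm : r ∉ d.keys := fun hc => by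
        rw [(PySem.Dict.contains_iff_mem_keys _ _).2 hc] at h'; exact absurd h' (by simp)
      have hd : pvInsN d r = d.insert r (d.size : Int) := by simp [pvInsN, h']
      have hnd' : (d.insert r (d.size : Int)).keys.Nodup := PySem.Dict.nodup_keys_insert _ _ _ hnd
      have hsz : (d.size : Int) = (d.items.length : Int) := rfl
      rw [hd, ih _ hnd', PySem.Dict.items_insert_of_not_contains _ _ h',
          PySem.Dict.keys_insert_of_not_contains _ _ h', hsz]
      simp [pvNew, hm, pvEnum]

-- membership in pvNew
lemma pvNew_mem (ns : List String) : ∀ (seen : List String) (x : String),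
    x ∈ pvNew seen ns ↔ x ∈ ns ∧ x ∉ seen := by
  induction ns with
  | nil => intro seen x; simp [pvNew]
  | cons c l ih =>
    intro seen x
    by_cases h : c ∈ seen
    · simp only [pvNew, if_pos h, ih]
      constructor
      · rintro ⟨hx, hs⟩; exact ⟨List.mem_cons_of_mem _ hx, hs⟩
      · rintro ⟨hx, hs⟩
        rcases List.mem_cons.1 hx with rfl | hx
        · exact absurd h hs
        · exact ⟨hx, hs⟩
    · simp only [pvNew, if_neg h, List.mem_cons, ih]
      constructor
      · rintro (rfl | ⟨hx, hs⟩)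
        · exact ⟨Or.inl rfl, h⟩
        · exact ⟨Or.inr hx, fun hm => hs (List.mem_append_left _ hm)⟩
      · rintro ⟨rfl | hx, hs⟩
        · exact Or.inl rfl
        · by_cases hxc : x = c
          · exact Or.inl hxc
          · exact Or.inr ⟨hx, by simp [hs, hxc]⟩

lemma pvNew_nodup (ns : List String) : ∀ (seen : List String), (pvNew seen ns).Nodup := by
  induction ns with
  | nil => intro seen; simp [pvNew]
  | cons c l ih =>
    intro seen
    by_cases h : c ∈ seen
    · rw [pvNew, if_pos h]; exact ih seen
    · simp only [pvNew, if_neg h, List.nodup_cons]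
      refine ⟨fun hm => ?_, ih _⟩
      have := ((pvNew_mem l _ c).1 hm).2
      simp at this

-- first-occurrence index as a Nat
def pvIdxN (l : List String) (x : String) : Nat := (PySem.List.index? l x).getD 0

lemma pvIdxN_cons_of_ne (c : String) (l : List String) (x : String) (hne : x ≠ c)
    (hx : x ∈ l) : pvIdxN (c :: l) x = pvIdxN l x + 1 := by
  obtain ⟨k, hk⟩ := Option.isSome_iff_exists.1 ((PySem.List.index?_isSome_iff l x).2 hx)
  unfold pvIdxN
  rw [PySem.List.index?_cons_of_ne _ (Ne.symm hne), hk]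
  simp

-- along pvNew, first-occurrence indices strictly increase
lemma pvNew_pairwise (ns : List String) : ∀ (seen : List String),
    (pvNew seen ns).Pairwise (fun a b => pvIdxN ns a < pvIdxN ns b) := by
  induction ns with
  | nil => intro seen; simp [pvNew]
  | cons c l ih =>
    intro seen
    by_cases h : c ∈ seen
    · rw [pvNew, if_pos h]
      refine ((ih seen).imp_of_mem ?_)
      intro a b ha hb hlt
      have ha' := (pvNew_mem l seen a).1 ha
      have hb' := (pvNew_mem l seen b).1 hb
      have hac : a ≠ c := fun hac => ha'.2 (hac ▸ h)
      have hbc : b ≠ c := fun hbc => hb'.2 (hbc ▸ h)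
      rw [pvIdxN_cons_of_ne _ _ _ hac ha'.1, pvIdxN_cons_of_ne _ _ _ hbc hb'.1]
      omega
    · rw [pvNew, if_neg h]
      refine List.Pairwise.cons ?_ ?_
      · intro b hb
        have hb' := (pvNew_mem l _ b).1 hb
        have hbc : b ≠ c := fun hbc => hb'.2 (by simp [hbc])
        have : pvIdxN (c :: l) c = 0 := by
          unfold pvIdxN; rw [PySem.List.index?_cons_self]; rfl
        rw [this, pvIdxN_cons_of_ne _ _ _ hbc hb'.1]
        omega
      · refine ((ih (seen ++ [c])).imp_of_mem ?_)
        intro a b ha hb hlt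
        have ha' := (pvNew_mem l _ a).1 ha
        have hb' := (pvNew_mem l _ b).1 hb
        have hac : a ≠ c := fun hx => ha'.2 (by simp [hx])
        have hbc : b ≠ c := fun hx => hb'.2 (by simp [hx])
        rw [pvIdxN_cons_of_ne _ _ _ hac ha'.1, pvIdxN_cons_of_ne _ _ _ hbc hb'.1]
        omega

-- B's reverse position loop, rewritten as a foldr over enumerate
lemma pvFoldFirst (names : List String) :
    (PySem.List.pyRange (PySem.List.len names - 1) (-1) (-1)).foldl
        (fun (d : PySem.Dict String Int) pos => d.insert (PySem.List.pyGetD names pos "") pos)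
        PySem.Dict.empty
    = (PySem.List.enumerate names 0).foldr (fun p d => d.insert p.2 p.1) PySem.Dict.empty := by
  rw [PySem.List.pyRange_neg_one_eq_reverse, List.foldl_reverse,
      PySem.List.enumerate_eq_map_pyRange (d := "") (xs := names), List.foldr_map]
  norm_num

-- the dict built by the reverse scan: lookup = first occurrence position (shifted by s)
lemma pvFirst_get (l : List String) (s : Int) (x : String) :
    ((PySem.List.enumerate l s).foldr (fun p d => d.insert p.2 p.1) PySem.Dict.empty).get? x
      = (PySem.List.index? l x).map (fun i => s + (i : Int)) := by
  induction l generalizing s with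
  | nil =>
    rw [PySem.List.enumerate_nil]
    simp [PySem.List.index?_eq_idxOf?]
  | cons c l ih =>
    rw [PySem.List.enumerate_cons]
    by_cases hx : x = c
    · subst hx
      rw [List.foldr_cons]
      simp only [PySem.Dict.get?_insert_self, PySem.List.index?_cons_self]
      simp
    · rw [List.foldr_cons]
      rw [PySem.Dict.get?_insert_of_ne _ _ hx, ih (s + 1),
          PySem.List.index?_cons_of_ne _ (Ne.symm hx)]
      cases PySem.List.index? l x with
      | none => rfl
      | some k => simp; ring

lemma pvFirst_nodup (l : List String) (s : Int) :
    ((PySem.List.enumerate l s).foldr (fun p d => d.insert p.2 p.1)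
      PySem.Dict.empty).keys.Nodup := by
  induction l generalizing s with
  | nil =>
    rw [PySem.List.enumerate_nil, List.foldr_nil]
    exact PySem.Dict.nodup_keys_empty
  | cons c l ih =>
    rw [PySem.List.enumerate_cons, List.foldr_cons]
    exact PySem.Dict.nodup_keys_insert _ _ _ (ih (s + 1))

lemma pvFirst_mem_keys (l : List String) (s : Int) (x : String) :
    x ∈ ((PySem.List.enumerate l s).foldr (fun p d => d.insert p.2 p.1)
      PySem.Dict.empty).keys ↔ x ∈ l := by
  rw [← PySem.Dict.contains_iff_mem_keys]
  rw [show (((PySem.List.enumerate l s).foldr (fun p d => d.insert p.2 p.1)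
        PySem.Dict.empty).contains x)
      = (((PySem.List.enumerate l s).foldr (fun p d => d.insert p.2 p.1)
        PySem.Dict.empty).get? x).isSome from PySem.Dict.contains_eq_isSome_get? _ _]
  rw [pvFirst_get]
  rw [← PySem.List.index?_isSome_iff l x]
  cases PySem.List.index? l x <;> simp

-- for x in l, the getD lookup in the reverse-scan dict started at 0 is the first index
lemma pvFirst_getD (l : List String) (x : String) (hx : x ∈ l) :
    ((PySem.List.enumerate l 0).foldr (fun p d => d.insert p.2 p.1)
      PySem.Dict.empty).getD x 0 = (pvIdxN l x : Int) := by
  obtain ⟨k, hk⟩ := Option.isSome_iff_exists.1 ((PySem.List.index?_isSome_iff l x).2 hx)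
  have h := pvFirst_get l 0 x
  rw [hk] at h
  show (((PySem.List.enumerate l 0).foldr (fun p d => d.insert p.2 p.1)
      PySem.Dict.empty).get? x).getD 0 = (pvIdxN l x : Int)
  rw [h]
  unfold pvIdxN
  rw [hk]
  simp

-- sorted(first, key=first.get) is exactly the first-appearance order pvNew [] names
lemma pvOrder_eq (names : List String) :
    PySem.List.sorted
      (((PySem.List.enumerate names 0).foldr (fun p d => d.insert p.2 p.1)
        PySem.Dict.empty).keys)
      (fun x => ((PySem.List.enumerate names 0).foldr (fun p d => d.insert p.2 p.1)
        PySem.Dict.empty).getD x 0)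
    = pvNew [] names := by
  apply PySem.List.sorted_eq_of_perm_of_pairwise_lt
  · rw [List.perm_ext_iff_of_nodup (pvNew_nodup names []) (pvFirst_nodup names 0)]
    intro a
    rw [pvNew_mem, pvFirst_mem_keys]
    simp
  · refine ((pvNew_pairwise names []).imp_of_mem ?_)
    intro a b ha hb hlt
    have ha' := ((pvNew_mem names [] a).1 ha).1
    have hb' := ((pvNew_mem names [] b).1 hb).1
    rw [pvFirst_getD _ _ ha', pvFirst_getD _ _ hb']
    exact_mod_cast hlt

def pvEnumMapFn (p : Int × String) : String × Int := (p.2, p.1)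

lemma pvEnumMap (l : List String) (k : Int) :
    (PySem.List.enumerate l k).map pvEnumMapFn = pvEnum k l := by
  induction l generalizing k with
  | nil => simp [PySem.List.enumerate_nil, pvEnum]
  | cons r l ih => rw [PySem.List.enumerate_cons]; simp [pvEnum, pvEnumMapFn, ih]

-- B's final dict has items = pvEnum 0 ord, for any nodup ord
lemma pvItemsB (ord : List String) (hnd : ord.Nodup) :
    ((PySem.List.enumerate ord 0).foldl
      (fun (d : PySem.Dict String Int) p => d.insert p.2 p.1) PySem.Dict.empty).items
    = pvEnum 0 ord := by
  have h := PySem.Dict.items_foldl_insert_fresh (l := PySem.List.enumerate ord 0)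
      (k := fun p => p.2) (v := fun p => p.1) (d := PySem.Dict.empty)
      (by intro a _; exact PySem.Dict.contains_empty _)
      (by rw [PySem.List.map_snd_enumerate]; exact hnd)
  rw [h, show (fun (a : Int × String) => ((fun p => p.2) a, (fun p => p.1) a)) = pvEnumMapFn from rfl,
      pvEnumMap]
  rfl

-- A's dict equals B's dict
lemma pvDictEq (names : List String) :
    names.foldl pvInsN PySem.Dict.empty
    = (PySem.List.enumerate
        (PySem.List.sorted
          (((PySem.List.enumerate names 0).foldr (fun p d => d.insert p.2 p.1)
            PySem.Dict.empty).keys)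
          (fun x => ((PySem.List.enumerate names 0).foldr (fun p d => d.insert p.2 p.1)
            PySem.Dict.empty).getD x 0)) 0).foldl
        (fun (d : PySem.Dict String Int) p => d.insert p.2 p.1) PySem.Dict.empty := by
  apply PySem.Dict.ext
  rw [pvOrder_eq, pvItemsB _ (pvNew_nodup names []),
      pvItemsA names PySem.Dict.empty (by simp)]
  simp [PySem.Dict.empty, PySem.Dict.keys]

-- ===== VERDICT (by name: the statement is the Claim_ definition above) =====
theorem get_rel_dict_spec : Claim_equal_get_rel_dict := by
  intro tuples _
  unfold Spec_get_rel_dict get_rel_dict get_rel_dict_alt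
  dsimp only
  rw [PySem.List.foldl_pyRange_pyGetD _ _ _ _ (by norm_num)]
  simp only [Int.toNat_zero, List.drop_zero]
  rw [pvLoopA, pvFlat, pvFoldFirst, pvDictEq]
  simp
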